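-- pv_equiv track=rewrite | github.com/Buried-In-Code/Neptunes-Hooks | neptunes_hooks/utils.py | _calculate_overall
-- ===== SOURCE A (Python) =====
-- from typing import Any, Dict, List, Optional, Tuple
--
-- def _calculate_overall(data: Dict[str, List[str]]) -> List[str]:
--     leading_count = {}
--     for _stats, leaders in data.items():
--         for player in leaders:
--             if player in leading_count:
--                 leading_count[player] += 1
--             else:
--                 leading_count[player] = 1
--     leading = []
--     max_count = -1
--     for player, count in leading_count.items():
--         if count > max_count:
--             leading = [player]
--             max_count = count
--         elif count == max_count:
--             leading.append(player)
--     return leading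
-- ===== SOURCE B (Python) =====
-- from typing import Dict, List
--
--
-- def _calculate_overall(data: Dict[str, List[str]]) -> List[str]:
--     players = [player for leaders in data.values() for player in leaders]
--     distinct = []
--     for player in players:
--         if player not in distinct:
--             distinct.append(player)
--     max_count = max((players.count(player) for player in distinct), default=0)
--     return [player for player in distinct if players.count(player) == max_count]
-- ===== Notes on version B (the rewrite author's own statement) =====
-- stated objective: alternative
-- what changed: A builds a frequency hash map and selects leaders in a fused running-max loop; B uses no map at all: it flattens the lists, dedups by list membership, counts each distinct player by rescanning the flat list (list.count), and filters the distinct players at the maximum count.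
import Mathlib
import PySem

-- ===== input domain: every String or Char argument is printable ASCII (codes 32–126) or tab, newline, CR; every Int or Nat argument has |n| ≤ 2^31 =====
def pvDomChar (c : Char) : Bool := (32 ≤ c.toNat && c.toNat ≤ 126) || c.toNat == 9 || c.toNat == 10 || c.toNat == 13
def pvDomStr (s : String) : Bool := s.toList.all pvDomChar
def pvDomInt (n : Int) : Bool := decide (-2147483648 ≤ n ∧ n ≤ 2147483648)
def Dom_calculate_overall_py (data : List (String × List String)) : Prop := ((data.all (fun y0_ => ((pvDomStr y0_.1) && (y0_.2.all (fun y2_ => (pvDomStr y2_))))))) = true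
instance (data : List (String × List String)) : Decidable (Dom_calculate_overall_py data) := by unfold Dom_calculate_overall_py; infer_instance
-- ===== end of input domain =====

-- B replaces A's frequency hash map + fused running-max loop by a map-free alternative: flatten, dedup by list membership, count each distinct player by rescanning the flat list, filter at the maximum count (alternative algorithm, quadratic, not faster).


-- ===== PORT A =====
def calculate_overall_py (data : List (String × List String)) : List String :=
  let leading_count : PySem.Dict String Int :=
    data.foldl (fun d pr =>
      pr.2.foldl (fun d player =>
        if d.contains player then d.modify player 0 (· + 1) else d.insert player 1) d)
      PySem.Dict.empty
  let r := leading_count.items.foldl (fun (s : List String × Int) pc =>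
      if s.2 < pc.2 then ([pc.1], pc.2)
      else if pc.2 == s.2 then (s.1 ++ [pc.1], s.2)
      else s) ([], -1)
  r.1

-- ===== PORT B =====
def calculate_overall_py_alt (data : List (String × List String)) : List String :=
  let players : List String := data.flatMap (fun pr => pr.2)
  let distinct : List String :=
    players.foldl (fun acc player => if acc.contains player then acc else acc ++ [player]) []
  let max_count : Int :=
    PySem.List.maxD (distinct.map (fun player => (players.count player : Int))) (fun v => v) 0
  distinct.filter (fun player => ((players.count player : Int) == max_count))

-- ===== PRECONDITION & SPEC =====
def Spec_calculate_overall_py (data : List (String × List String)) (out : List String) : Prop := out = calculate_overall_py_alt data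
instance (data : List (String × List String)) (out : List String) : Decidable (Spec_calculate_overall_py data out) := by unfold Spec_calculate_overall_py; infer_instance

-- ===== CLAIM (what is proved, stated in full; the proofs are below) =====
def Claim_equal_calculate_overall_py : Prop := ∀ (data : List (String × List String)), Dom_calculate_overall_py data → Spec_calculate_overall_py data (calculate_overall_py data)

-- ===== LEMMAS AND PROOFS =====

-- A's count step (membership test, then += or = 1) is the unconditional get-default insert.
theorem stepA_eq_stepB (d : PySem.Dict String Int) (p : String) :
    (if d.contains p then d.modify p 0 (· + 1) else d.insert p 1)
      = d.insert p (d.getD p 0 + 1) := by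
  by_cases h : d.contains p
  · simp [h, PySem.Dict.modify]
  · rw [if_neg h, PySem.Dict.getD_of_not_contains d 0 (by simpa using h)]
    norm_num

-- A's fused running-max loop, characterised: result = leaders-so-far prefix ++ filter at the overall max.
theorem fused_loop (l : List (String × Int)) (acc : List String) (m : Int) :
    l.foldl (fun (s : List String × Int) pc =>
        if s.2 < pc.2 then ([pc.1], pc.2)
        else if pc.2 == s.2 then (s.1 ++ [pc.1], s.2)
        else s) (acc, m)
    = ((if m < l.foldl (fun a pc => max a pc.2) m then [] else acc)
        ++ (l.filter (fun pc => pc.2 == l.foldl (fun a pc => max a pc.2) m)).map (fun pc => pc.1),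
       l.foldl (fun a pc => max a pc.2) m) := by
  induction l generalizing acc m with
  | nil => simp
  | cons pc rest ih =>
    have hbase : ∀ (b : Int), b ≤ rest.foldl (fun a q => max a q.2) b := by
      intro b
      have := (PySem.List.le_foldl_max (rest.map (fun q => q.2)) b).1
      rwa [List.foldl_map] at this
    simp only [List.foldl_cons]
    rcases lt_trichotomy m pc.2 with hlt | heq | hgt
    · rw [if_pos hlt, ih]
      have hmax : max m pc.2 = pc.2 := max_eq_right hlt.le
      simp only [hmax]
      set M := rest.foldl (fun a q => max a q.2) pc.2 with hM
      have hpM : pc.2 ≤ M := hbase pc.2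
      rcases eq_or_lt_of_le hpM with hEq | hLt
      · simp [← hEq, hlt]
      · simp [hLt, lt_of_lt_of_le hlt hpM, (show ¬ pc.2 = M by omega)]
    · rw [if_neg (by omega), if_pos (by simp [heq])]
      have hmax : max m pc.2 = m := by rw [← heq, max_self]
      rw [ih]
      simp only [hmax]
      set M := rest.foldl (fun a q => max a q.2) m with hM
      have hpM : m ≤ M := hbase m
      rcases eq_or_lt_of_le hpM with hEq | hLt
      · simp [← hEq, ← heq, List.append_assoc]
      · simp [hLt, (show ¬ pc.2 = M by omega)]
    · rw [if_neg (by omega), if_neg (by simp; omega)]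
      have hmax : max m pc.2 = m := max_eq_left hgt.le
      rw [ih]
      simp only [hmax]
      set M := rest.foldl (fun a q => max a q.2) m with hM
      have hpM : m ≤ M := hbase m
      simp [(show ¬ pc.2 = M by omega)]

theorem calculate_overall_py_eq (data : List (String × List String)) :
    calculate_overall_py data = calculate_overall_py_alt data := by
  unfold calculate_overall_py calculate_overall_py_alt
  dsimp only
  set players := data.flatMap (fun pr => pr.2) with hplayers
  have hflat :
      data.foldl (fun d pr =>
        pr.2.foldl (fun d player =>
          if d.contains player then d.modify player 0 (· + 1) else d.insert player 1) d)
        PySem.Dict.empty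
      = PySem.Dict.counter players := by
    rw [hplayers, Eq.symm List.foldl_flatMap]
    have hstep : (fun (d : PySem.Dict String Int) player =>
        if d.contains player then d.modify player 0 (· + 1) else d.insert player 1)
        = fun d player => d.insert player (d.getD player 0 + 1) := by
      funext d p; exact stepA_eq_stepB d p
    rw [hstep, PySem.Dict.foldl_insert_getD_add_one_eq_counter]
  have hdistinct :
      players.foldl (fun acc player => if acc.contains player then acc else acc ++ [player]) []
      = PySem.Set.ofList players := rfl
  rw [hflat, hdistinct, fused_loop, PySem.Dict.items_counter]
  simp only [ite_self, List.nil_append]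
  rcases hD : PySem.Set.ofList players with _ | ⟨k, rest⟩
  · simp
  · have hmap : ((k :: rest).map (fun p => (p, (players.count p : Int)))).foldl
        (fun a pc => max a pc.2) (-1)
        = rest.foldl (fun a p => max a (players.count p : Int)) (players.count k : Int) := by
      simp only [List.map_cons, List.foldl_cons, List.foldl_map]
      rw [max_eq_right (by omega : (-1:Int) ≤ (players.count k : Int))]
    have hmaxD : PySem.List.maxD ((k :: rest).map (fun p => (players.count p : Int))) (fun v => v) 0
        = rest.foldl (fun a p => max a (players.count p : Int)) (players.count k : Int) := by
      simp [PySem.List.maxD, PySem.List.max?_id_cons, List.foldl_map]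
    rw [hmap, hmaxD]
    set M := rest.foldl (fun a p => max a (players.count p : Int)) (players.count k : Int) with hM
    rw [List.filter_map, List.map_map]
    simp [Function.comp_def]

-- ===== VERDICT (by name: the statement is the Claim_ definition above) =====
theorem calculate_overall_py_spec : Claim_equal_calculate_overall_py := by
  intro data _
  unfold Spec_calculate_overall_py
  exact calculate_overall_py_eq data
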